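-- pv_equiv track=rewrite | github.com/danielkorat/few_shot | few_shot/utils.py | extract_non_spects
-- ===== SOURCE A (Python) =====
-- def extract_non_spects(noun_compounds, gold_aspects):
--     non_asps = []
--     for noun_comp in noun_compounds:
--         nn_idx_range = noun_comp[1]
--         non_asp_flag = True
--         for gold_asp in gold_aspects:
--             gold_idx_range = list(range(gold_asp[1], gold_asp[2]+1))
--             for idx in list(range(nn_idx_range[0], nn_idx_range[1]+1)):
--                 if idx in gold_idx_range:
--                     non_asp_flag = False
--
--         if non_asp_flag:
--             non_asps.append(noun_comp[0])
--
--     return(non_asps)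
-- ===== SOURCE B (Python) =====
-- def extract_non_spects(noun_compounds, gold_aspects):
--     return [name for name, (a0, a1) in noun_compounds
--             if not any(a0 <= a1 and g[1] <= g[2] and a0 <= g[2] and g[1] <= a1
--                        for g in gold_aspects)]
-- ===== Notes on version B (the rewrite author's own statement) =====
-- stated objective: simpler
-- what changed: Replaces the per-index range materialisation and nested membership scans with a single list comprehension using the closed-form integer-interval overlap test on each (noun compound, gold aspect) pair.
import Mathlib
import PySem

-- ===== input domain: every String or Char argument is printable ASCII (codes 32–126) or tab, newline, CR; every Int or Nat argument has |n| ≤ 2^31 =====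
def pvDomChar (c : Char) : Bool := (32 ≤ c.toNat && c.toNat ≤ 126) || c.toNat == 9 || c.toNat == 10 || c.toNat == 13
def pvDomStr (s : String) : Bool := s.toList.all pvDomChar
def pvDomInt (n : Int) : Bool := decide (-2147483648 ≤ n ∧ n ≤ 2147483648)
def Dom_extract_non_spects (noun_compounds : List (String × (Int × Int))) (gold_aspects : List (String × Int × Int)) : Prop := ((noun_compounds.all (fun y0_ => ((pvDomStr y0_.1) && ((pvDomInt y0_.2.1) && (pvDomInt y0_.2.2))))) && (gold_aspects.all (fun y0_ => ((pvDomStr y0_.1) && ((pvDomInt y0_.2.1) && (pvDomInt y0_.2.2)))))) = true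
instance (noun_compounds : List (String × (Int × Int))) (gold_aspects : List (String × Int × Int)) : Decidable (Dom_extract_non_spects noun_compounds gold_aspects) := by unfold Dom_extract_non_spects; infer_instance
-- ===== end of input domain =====

-- B replaces the per-index range scans with a closed-form interval-overlap test per pair (simpler, one comprehension).
-- ===== PORT A =====
-- helper: the inner double loop of A computing non_asp_flag for one noun compound
def pvFlagA (gold_aspects : List (String × Int × Int)) (noun_comp : String × (Int × Int)) : Bool :=
  let nn_idx_range := noun_comp.2
  gold_aspects.foldl (fun flag gold_asp =>
    let gold_idx_range := PySem.List.pyRange gold_asp.2.1 (gold_asp.2.2 + 1) 1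
    (PySem.List.pyRange nn_idx_range.1 (nn_idx_range.2 + 1) 1).foldl
      (fun flag idx => if idx ∈ gold_idx_range then false else flag) flag) true

def extract_non_spects (noun_compounds : List (String × (Int × Int))) (gold_aspects : List (String × Int × Int)) : List String :=
  noun_compounds.foldl (fun non_asps noun_comp =>
    if pvFlagA gold_aspects noun_comp then non_asps ++ [noun_comp.1] else non_asps) []

-- ===== PORT B =====
-- helper: closed-form overlap of the inclusive ranges [a0,a1] and [g1,g2]
def pvOverlap (c : String × (Int × Int)) (g : String × Int × Int) : Bool :=
  decide (c.2.1 ≤ c.2.2) && decide (g.2.1 ≤ g.2.2) && decide (c.2.1 ≤ g.2.2) && decide (g.2.1 ≤ c.2.2)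

def extract_non_spects_alt (noun_compounds : List (String × (Int × Int))) (gold_aspects : List (String × Int × Int)) : List String :=
  (noun_compounds.filter (fun c => !(gold_aspects.any (pvOverlap c)))).map Prod.fst

-- ===== PRECONDITION & SPEC =====
def Spec_extract_non_spects (noun_compounds : List (String × (Int × Int))) (gold_aspects : List (String × Int × Int)) (out : List String) : Prop := out = extract_non_spects_alt noun_compounds gold_aspects
instance (noun_compounds : List (String × (Int × Int))) (gold_aspects : List (String × Int × Int)) (out : List String) : Decidable (Spec_extract_non_spects noun_compounds gold_aspects out) := by unfold Spec_extract_non_spects; infer_instance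

-- ===== CLAIM (what is proved, stated in full; the proofs are below) =====
def Claim_equal_extract_non_spects : Prop := ∀ (noun_compounds : List (String × (Int × Int))) (gold_aspects : List (String × Int × Int)), Dom_extract_non_spects noun_compounds gold_aspects → Spec_extract_non_spects noun_compounds gold_aspects (extract_non_spects noun_compounds gold_aspects)

-- ===== LEMMAS AND PROOFS =====

-- inner loop: flag stays unless some idx of the compound range is in the gold range
lemma pv_inner (gr : List Int) (xs : List Int) (b : Bool) :
    xs.foldl (fun flag idx => if idx ∈ gr then false else flag) b
      = (b && !(xs.any (fun idx => decide (idx ∈ gr)))) := by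
  induction xs generalizing b with
  | nil => simp
  | cons x tl ih =>
    simp only [List.foldl_cons]
    rw [ih]
    by_cases h : x ∈ gr <;> cases b <;> simp [List.any_cons, h]

-- middle loop: conjunction of per-gold no-overlap flags
lemma pv_outer (q : (String × Int × Int) → Bool) (gs : List (String × Int × Int)) (b : Bool)
    (f : Bool → (String × Int × Int) → Bool) (hf : ∀ flag g, f flag g = (flag && !(q g))) :
    gs.foldl f b = (b && !(gs.any q)) := by
  induction gs generalizing b with
  | nil => simp
  | cons g tl ih =>
    rw [List.foldl_cons, hf, ih]
    simp [List.any_cons, Bool.not_or, Bool.and_assoc]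

-- the nested index scan equals the closed-form interval-overlap test
lemma pv_overlap_eq (a0 a1 g1 g2 : Int) :
    ((PySem.List.pyRange a0 (a1 + 1) 1).any
        (fun idx => decide (idx ∈ PySem.List.pyRange g1 (g2 + 1) 1)))
      = (decide (a0 ≤ a1) && decide (g1 ≤ g2) && decide (a0 ≤ g2) && decide (g1 ≤ a1)) := by
  rw [Bool.eq_iff_iff]
  simp only [List.any_eq_true, PySem.List.mem_pyRange_one, decide_eq_true_eq, Bool.and_eq_true]
  constructor
  · rintro ⟨i, ⟨h1, h2⟩, h3, h4⟩; omega
  · rintro ⟨⟨⟨h1, h2⟩, h3⟩, h4⟩; exact ⟨max a0 g1, by omega, by omega⟩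

lemma pv_flag_eq (ga : List (String × Int × Int)) (c : String × (Int × Int)) :
    pvFlagA ga c = !(ga.any (pvOverlap c)) := by
  unfold pvFlagA
  rw [pv_outer (pvOverlap c) ga true _ (fun flag g => by
    rw [pv_inner, pv_overlap_eq]; rfl)]
  simp

lemma pv_main (ga : List (String × Int × Int)) :
    ∀ (nc : List (String × (Int × Int))) (acc : List String),
      nc.foldl (fun non_asps c =>
          if pvFlagA ga c then non_asps ++ [c.1] else non_asps) acc
        = acc ++ extract_non_spects_alt nc ga := by
  intro nc
  induction nc with
  | nil => intro acc; simp [extract_non_spects_alt]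
  | cons c tl ih =>
    intro acc
    rw [List.foldl_cons, pv_flag_eq]
    by_cases h : ga.any (pvOverlap c) = true
    · simp [ih, extract_non_spects_alt, h]
    · simp only [h, Bool.not_false, if_pos, ih]
      simp [extract_non_spects_alt, h, List.append_assoc]

-- ===== VERDICT =====
theorem extract_non_spects_spec : Claim_equal_extract_non_spects := by
  intro nc ga _
  unfold Spec_extract_non_spects extract_non_spects
  simpa using pv_main ga nc []
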